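-- pv_equiv track=rewrite | github.com/iagocanalejas/pyutils | pyutils/validators/figi.py | is_valid_figi
-- ===== SOURCE A (Python) =====
-- def is_valid_figi(figi: str) -> bool:
--     if len(figi) != 12:
--         return False
--
--     # Converts a character to its numeric value
--     def char_to_value(c):
--         if c.isdigit():
--             return int(c)
--         else:
--             return ord(c.upper()) - ord("A") + 10
--
--     total = 0
--     for i, char in enumerate(figi[:-1]):  # Ignore the last character (checksum digit)
--         value = char_to_value(char)
--         total += value
--         total *= 2 if i % 2 == 0 else 1  # Double it on even positions (starting from index 0)
--
--     checksum = (10 - (total % 10)) % 10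
--     return str(checksum) == figi[-1]
-- ===== SOURCE B (Python) =====
-- def is_valid_figi(figi: str) -> bool:
--     if len(figi) != 12:
--         return False
--
--     def char_to_value(c):
--         if c.isdigit():
--             return int(c)
--         else:
--             return ord(c.upper()) - ord("A") + 10
--
--     # weight of position i is 2 ** (number of even indices in [i, 10]);
--     # built right-to-left with a multiplier that doubles on entering an even index
--     weights = []
--     mult = 1
--     for i in range(10, -1, -1):
--         if i % 2 == 0:
--             mult *= 2
--         weights.append(mult)
--     weights.reverse()
--
--     total = sum(char_to_value(c) * w for c, w in zip(figi[:11], weights))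
--     checksum = (10 - total % 10) % 10
--     return str(checksum) == figi[-1]
-- ===== Notes on version B (the rewrite author's own statement) =====
-- stated objective: alternative
-- what changed: Replaces A's in-place running fold (add value, then double the accumulator on even indices) by precomputed per-position weights (2^(#even indices in [i,10]), built right-to-left) and a single weighted sum over the first 11 characters.
import Mathlib
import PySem

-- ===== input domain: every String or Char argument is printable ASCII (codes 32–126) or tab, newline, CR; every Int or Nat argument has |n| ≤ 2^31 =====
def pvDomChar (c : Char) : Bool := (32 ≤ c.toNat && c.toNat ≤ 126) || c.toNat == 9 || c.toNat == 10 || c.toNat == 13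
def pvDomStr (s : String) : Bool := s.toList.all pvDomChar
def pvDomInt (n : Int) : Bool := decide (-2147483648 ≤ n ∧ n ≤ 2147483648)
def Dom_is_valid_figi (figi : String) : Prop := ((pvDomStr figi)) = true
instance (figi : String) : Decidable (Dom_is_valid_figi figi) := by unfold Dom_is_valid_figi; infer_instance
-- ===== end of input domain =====

-- B replaces A's running-doubling fold by per-position weights (2^(#even indices from i to 10)) and a weighted sum; objective: alternative decomposition, same cost.

-- shared helper: Python's local char_to_value (identical in A and B); exact on ASCII
def pvCharToValue (c : Char) : Int :=
  if c.isDigit then (c.toNat : Int) - 48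
  else ((c.toUpper.toNat : Int) - 65) + 10

-- ===== PORT A =====
def is_valid_figi (figi : String) : Bool :=
  let l := figi.toList
  if l.length ≠ 12 then false
  else
    let total := (PySem.List.enumerate (PySem.List.slice l none (some (-1)))).foldl
      (fun t p => (t + pvCharToValue p.2) * (if PySem.Int.mod p.1 2 == 0 then 2 else 1)) 0
    let checksum := PySem.Int.mod (10 - PySem.Int.mod total 10) 10
    match PySem.List.pyGet? l (-1) with
    | some c => PySem.Int.toChars checksum == [c]
    | none => false    -- unreachable: l is nonempty here (length 12)

-- ===== PORT B =====
def is_valid_figi_alt (figi : String) : Bool :=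
  let l := figi.toList
  if l.length ≠ 12 then false
  else
    let weights := (((PySem.List.pyRange 10 (-1) (-1)).foldl
      (fun (p : Int × List Int) i =>
        let m := if PySem.Int.mod i 2 == 0 then p.1 * 2 else p.1
        (m, p.2 ++ [m])) (1, ([] : List Int))).2).reverse
    let total := (((PySem.List.slice l none (some 11)).zip weights).map
      (fun p => pvCharToValue p.1 * p.2)).sum
    let checksum := PySem.Int.mod (10 - PySem.Int.mod total 10) 10
    match PySem.List.pyGet? l (-1) with
    | some c => PySem.Int.toChars checksum == [c]
    | none => false

-- ===== PRECONDITION & SPEC =====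
def Spec_is_valid_figi (figi : String) (out : Bool) : Prop := out = is_valid_figi_alt figi
instance (figi : String) (out : Bool) : Decidable (Spec_is_valid_figi figi out) := by unfold Spec_is_valid_figi; infer_instance

-- ===== CLAIM (what is proved, stated in full; the proofs are below) =====
def Claim_equal_is_valid_figi : Prop := ∀ (figi : String), Dom_is_valid_figi figi → Spec_is_valid_figi figi (is_valid_figi figi)

-- ===== LEMMAS AND PROOFS =====

lemma pv_len12 {α : Type} (l : List α) (h : l.length = 12) :
    ∃ a b c d e f g h' i j k m, l = [a,b,c,d,e,f,g,h',i,j,k,m] := by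
  match l, h with
  | [a,b,c,d,e,f,g,h',i,j,k,m], _ => exact ⟨a,b,c,d,e,f,g,h',i,j,k,m, rfl⟩

-- ===== VERDICT (by name: the statement is the Claim_ definition above) =====
theorem is_valid_figi_spec : Claim_equal_is_valid_figi := by
  intro figi _
  unfold Spec_is_valid_figi is_valid_figi is_valid_figi_alt
  generalize figi.toList = l
  by_cases hl : l.length = 12
  · obtain ⟨a,b,c,d,e,f,g,h',i,j,k,m, rfl⟩ := pv_len12 l hl
    simp [PySem.List.enumerate, PySem.List.slice, PySem.List.clampIdx, PySem.List.pyRange,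
      PySem.List.pyGet?, PySem.List.pyIdx?, PySem.Int.mod, List.range_succ]
    ring_nf
  · simp [hl]
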